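-- pv_equiv track=rewrite | github.com/dkingma/antennas | freqperturncoresize.py | max_AWG
-- ===== SOURCE A (Python) =====
-- def max_AWG(coreSize, numTurns):
--     maxTurns = {
--         12:  {14: 0, 16: 0, 18: 0, 20: 0, 22: 1, 24: 3, 26: 5, 28: 8, 30: 11, 32: 15, 34: 20, 36: 26},
--         16:  {14: 0, 16: 0, 18: 0, 20: 1, 22: 2, 24: 4, 26: 6, 28: 9, 30: 13, 32: 17, 34: 22, 36: 29},
--         25:  {14: 0, 16: 1, 18: 3, 20: 5, 22: 7, 24: 10, 26: 14, 28: 18, 30: 24, 32: 31, 34: 41, 36: 52},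
--         37:  {14: 4, 16: 6, 18: 9, 20: 12, 22: 17, 24: 22, 26: 29, 28: 37, 30: 48, 32: 60, 34: 78, 36: 98},
--         50:  {14: 8, 16: 12, 18: 16, 20: 22, 22: 28, 24: 37, 26: 47, 28: 59, 30: 76, 32: 94, 34: 121, 36: 151},
--         68:  {14: 12, 16: 16, 18: 21, 20: 28, 22: 36, 24: 46, 26: 59, 28: 74, 30: 94, 32: 117, 34: 150, 36: 187},
--         80:  {14: 17, 16: 23, 18: 30, 20: 39, 22: 51, 24: 64, 26: 82, 28: 103, 30: 129, 32: 161, 34: 204, 36: 255},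
--         94:  {14: 21, 16: 27, 18: 35, 20: 45, 22: 58, 24: 74, 26: 94, 28: 117, 30: 148, 32: 183, 34: 233, 36: 290},
--         106: {14: 21, 16: 27, 18: 36, 20: 46, 22: 59, 24: 74, 26: 95, 28: 118, 30: 149, 32: 185, 34: 235, 36: 293},
--         130: {14: 31, 16: 40, 18: 51, 20: 65, 22: 83, 24: 105, 26: 133, 28: 165, 30: 208, 32: 257, 34: 326, 36: 406},
--         157: {14: 39, 16: 50, 18: 64, 20: 81, 22: 103, 24: 129, 26: 164, 28: 204, 30: 256, 32: 316, 34: 401, 36: 499},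
--         184: {14: 38, 16: 50, 18: 63, 20: 81, 22: 102, 24: 129, 26: 163, 28: 202, 30: 254, 32: 314, 34: 398, 36: 496},
--         200: {14: 53, 16: 67, 18: 86, 20: 108, 22: 137, 24: 172, 26: 217, 28: 270, 30: 338, 32: 418, 34: 529, 36: 658}
--     }
--     max_turns_for_core = maxTurns[coreSize]
--     for wire_size in range(14, 36+1, 2):
--         if max_turns_for_core[wire_size] >= numTurns:
--             return wire_size
--     return None
-- ===== SOURCE B (Python) =====
-- # Rows of max-turns values per core size, ordered by wire size 14,16,...,36.
-- _MAX_TURNS_ROW = {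
--     12:  [0, 0, 0, 0, 1, 3, 5, 8, 11, 15, 20, 26],
--     16:  [0, 0, 0, 1, 2, 4, 6, 9, 13, 17, 22, 29],
--     25:  [0, 1, 3, 5, 7, 10, 14, 18, 24, 31, 41, 52],
--     37:  [4, 6, 9, 12, 17, 22, 29, 37, 48, 60, 78, 98],
--     50:  [8, 12, 16, 22, 28, 37, 47, 59, 76, 94, 121, 151],
--     68:  [12, 16, 21, 28, 36, 46, 59, 74, 94, 117, 150, 187],
--     80:  [17, 23, 30, 39, 51, 64, 82, 103, 129, 161, 204, 255],
--     94:  [21, 27, 35, 45, 58, 74, 94, 117, 148, 183, 233, 290],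
--     106: [21, 27, 36, 46, 59, 74, 95, 118, 149, 185, 235, 293],
--     130: [31, 40, 51, 65, 83, 105, 133, 165, 208, 257, 326, 406],
--     157: [39, 50, 64, 81, 103, 129, 164, 204, 256, 316, 401, 499],
--     184: [38, 50, 63, 81, 102, 129, 163, 202, 254, 314, 398, 496],
--     200: [53, 67, 86, 108, 137, 172, 217, 270, 338, 418, 529, 658],
-- }
--
--
-- def _first_at_least(values, x):
--     """Binary search: least index i with values[i] >= x (values nondecreasing)."""
--     lo, hi = 0, len(values)
--     while lo < hi:
--         mid = (lo + hi) // 2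
--         if values[mid] < x:
--             lo = mid + 1
--         else:
--             hi = mid
--     return lo
--
--
-- def max_AWG(coreSize, numTurns):
--     values = _MAX_TURNS_ROW[coreSize]
--     i = _first_at_least(values, numTurns)
--     return 14 + 2 * i if i < len(values) else None
-- ===== Notes on version B (the rewrite author's own statement) =====
-- stated objective: alternative
-- what changed: B stores the table as ordered 12-value rows per core size and binary-searches the row for the first entry >= numTurns (returning 14+2*index), replacing A's nested dicts and linear scan over wire sizes.
import Mathlib
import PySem

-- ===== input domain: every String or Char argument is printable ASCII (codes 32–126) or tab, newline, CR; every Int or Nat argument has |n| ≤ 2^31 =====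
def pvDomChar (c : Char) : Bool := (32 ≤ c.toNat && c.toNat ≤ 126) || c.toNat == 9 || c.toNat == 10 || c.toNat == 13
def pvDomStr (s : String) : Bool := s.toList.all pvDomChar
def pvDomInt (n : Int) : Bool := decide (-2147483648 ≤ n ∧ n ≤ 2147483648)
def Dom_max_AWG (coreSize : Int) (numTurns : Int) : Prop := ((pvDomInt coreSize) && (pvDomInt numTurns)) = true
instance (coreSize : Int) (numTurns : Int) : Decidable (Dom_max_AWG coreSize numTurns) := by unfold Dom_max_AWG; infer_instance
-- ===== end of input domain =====

-- B stores the table as ordered 12-value rows per core size and binary-searches the row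
-- for the first entry ≥ numTurns, instead of A's nested dicts and linear wire-size scan.

-- ===== PORT A =====
-- A's literal nested-dict table
def pvMaxTurns : PySem.Dict Int (PySem.Dict Int Int) := PySem.Dict.ofList [
  (12,  PySem.Dict.ofList [(14,0),(16,0),(18,0),(20,0),(22,1),(24,3),(26,5),(28,8),(30,11),(32,15),(34,20),(36,26)]),
  (16,  PySem.Dict.ofList [(14,0),(16,0),(18,0),(20,1),(22,2),(24,4),(26,6),(28,9),(30,13),(32,17),(34,22),(36,29)]),
  (25,  PySem.Dict.ofList [(14,0),(16,1),(18,3),(20,5),(22,7),(24,10),(26,14),(28,18),(30,24),(32,31),(34,41),(36,52)]),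
  (37,  PySem.Dict.ofList [(14,4),(16,6),(18,9),(20,12),(22,17),(24,22),(26,29),(28,37),(30,48),(32,60),(34,78),(36,98)]),
  (50,  PySem.Dict.ofList [(14,8),(16,12),(18,16),(20,22),(22,28),(24,37),(26,47),(28,59),(30,76),(32,94),(34,121),(36,151)]),
  (68,  PySem.Dict.ofList [(14,12),(16,16),(18,21),(20,28),(22,36),(24,46),(26,59),(28,74),(30,94),(32,117),(34,150),(36,187)]),
  (80,  PySem.Dict.ofList [(14,17),(16,23),(18,30),(20,39),(22,51),(24,64),(26,82),(28,103),(30,129),(32,161),(34,204),(36,255)]),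
  (94,  PySem.Dict.ofList [(14,21),(16,27),(18,35),(20,45),(22,58),(24,74),(26,94),(28,117),(30,148),(32,183),(34,233),(36,290)]),
  (106, PySem.Dict.ofList [(14,21),(16,27),(18,36),(20,46),(22,59),(24,74),(26,95),(28,118),(30,149),(32,185),(34,235),(36,293)]),
  (130, PySem.Dict.ofList [(14,31),(16,40),(18,51),(20,65),(22,83),(24,105),(26,133),(28,165),(30,208),(32,257),(34,326),(36,406)]),
  (157, PySem.Dict.ofList [(14,39),(16,50),(18,64),(20,81),(22,103),(24,129),(26,164),(28,204),(30,256),(32,316),(34,401),(36,499)]),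
  (184, PySem.Dict.ofList [(14,38),(16,50),(18,63),(20,81),(22,102),(24,129),(26,163),(28,202),(30,254),(32,314),(34,398),(36,496)]),
  (200, PySem.Dict.ofList [(14,53),(16,67),(18,86),(20,108),(22,137),(24,172),(26,217),(28,270),(30,338),(32,418),(34,529),(36,658)])]

-- A's for-loop over range(14, 36+1, 2): return the first wire size whose entry ≥ numTurns
def pvALoop (d : PySem.Dict Int Int) (numTurns : Int) : List Int → Option Int
  | [] => none
  | w :: ws => if d.getD w 0 ≥ numTurns then some w else pvALoop d numTurns ws

def max_AWG (coreSize : Int) (numTurns : Int) : Option Int :=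
  match pvMaxTurns.get? coreSize with
  | none => none   -- Python raises KeyError here; excluded by Pre_max_AWG
  | some d => pvALoop d numTurns (PySem.List.pyRange 14 37 2)

-- ===== PORT B =====
-- Source B's table: one ordered 12-value row per core size
def pvMaxTurnsRow : PySem.Dict Int (List Int) := PySem.Dict.ofList [
  (12,  [0, 0, 0, 0, 1, 3, 5, 8, 11, 15, 20, 26]),
  (16,  [0, 0, 0, 1, 2, 4, 6, 9, 13, 17, 22, 29]),
  (25,  [0, 1, 3, 5, 7, 10, 14, 18, 24, 31, 41, 52]),
  (37,  [4, 6, 9, 12, 17, 22, 29, 37, 48, 60, 78, 98]),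
  (50,  [8, 12, 16, 22, 28, 37, 47, 59, 76, 94, 121, 151]),
  (68,  [12, 16, 21, 28, 36, 46, 59, 74, 94, 117, 150, 187]),
  (80,  [17, 23, 30, 39, 51, 64, 82, 103, 129, 161, 204, 255]),
  (94,  [21, 27, 35, 45, 58, 74, 94, 117, 148, 183, 233, 290]),
  (106, [21, 27, 36, 46, 59, 74, 95, 118, 149, 185, 235, 293]),
  (130, [31, 40, 51, 65, 83, 105, 133, 165, 208, 257, 326, 406]),
  (157, [39, 50, 64, 81, 103, 129, 164, 204, 256, 316, 401, 499]),
  (184, [38, 50, 63, 81, 102, 129, 163, 202, 254, 314, 398, 496]),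
  (200, [53, 67, 86, 108, 137, 172, 217, 270, 338, 418, 529, 658])]

-- Source B's hand-written _first_at_least loop; values[mid] is always in range (lo < hi ≤ len),
-- so List.getD is exact here
def pvFirstAtLeast (values : List Int) (x : Int) (lo hi : Nat) : Nat :=
  if _h : lo < hi then
    let mid := (lo + hi) / 2
    if values.getD mid 0 < x then pvFirstAtLeast values x (mid + 1) hi
    else pvFirstAtLeast values x lo mid
  else lo
termination_by hi - lo
decreasing_by all_goals omega

def max_AWG_alt (coreSize : Int) (numTurns : Int) : Option Int :=
  match pvMaxTurnsRow.get? coreSize with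
  | none => none   -- Python raises KeyError here; excluded by Pre_max_AWG
  | some values =>
    let i := pvFirstAtLeast values numTurns 0 values.length
    if i < values.length then some (14 + 2 * (i : Int)) else none

-- ===== PRECONDITION & SPEC =====
-- Pre_ excludes coreSize values absent from the table: there both A and B raise KeyError.
def Pre_max_AWG (coreSize : Int) (numTurns : Int) : Prop :=
  coreSize ∈ ([12, 16, 25, 37, 50, 68, 80, 94, 106, 130, 157, 184, 200] : List Int)
instance (coreSize : Int) (numTurns : Int) : Decidable (Pre_max_AWG coreSize numTurns) := by
  unfold Pre_max_AWG; infer_instance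
def pvWitness_max_AWG : Int × Int := (50, 40)

def Spec_max_AWG (coreSize : Int) (numTurns : Int) (out : Option Int) : Prop := out = max_AWG_alt coreSize numTurns
instance (coreSize : Int) (numTurns : Int) (out : Option Int) : Decidable (Spec_max_AWG coreSize numTurns out) := by unfold Spec_max_AWG; infer_instance

-- ===== CLAIM (what is proved, stated in full; the proofs are below) =====
def Claim_equal_max_AWG : Prop := ∀ (coreSize : Int) (numTurns : Int), Dom_max_AWG coreSize numTurns → Pre_max_AWG coreSize numTurns → Spec_max_AWG coreSize numTurns (max_AWG coreSize numTurns)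

-- ===== LEMMAS AND PROOFS =====

theorem pvALoop_eq_find? (d : PySem.Dict Int Int) (n : Int) (ws : List Int) :
    pvALoop d n ws = ws.find? (fun w => decide (d.getD w 0 ≥ n)) := by
  induction ws with
  | nil => rfl
  | cons w ws ih => by_cases h : d.getD w 0 ≥ n <;> simp [pvALoop, List.find?, h, ih]

-- find? returns element i when the predicate is false before i and true at i (if in range)
theorem find?_eq_getElem?_of_first {α : Type} (xs : List α) (p : α → Bool) (i : Nat)
    (hlt : ∀ j (hj : j < xs.length), j < i → ¬ p xs[j])
    (hge : ∀ (hj : i < xs.length), p xs[i]) :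
    xs.find? p = xs[i]? := by
  induction xs generalizing i with
  | nil => simp
  | cons x xs ih =>
    cases i with
    | zero =>
      have h := hge (by simp)
      simp only [List.getElem_cons_zero] at h
      simp [List.find?, h]
    | succ i =>
      have h0 : ¬ p x := hlt 0 (by simp) (by omega)
      simp only [List.find?, h0, List.getElem?_cons_succ]
      exact ih i (fun j hj hji => hlt (j+1) (by simpa using hj) (by omega))
        (fun hj => hge (by simpa using hj))

-- invariant of Source B's binary-search loop on a nondecreasing list
theorem pvFirstAtLeast_inv (values : List Int) (x : Int)
    (hs : values.Pairwise (· ≤ ·)) (lo hi : Nat)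
    (hhi : hi ≤ values.length) (hlo : lo ≤ hi)
    (hb : ∀ j, j < lo → j < values.length → values.getD j 0 < x)
    (ha : ∀ j, hi ≤ j → j < values.length → x ≤ values.getD j 0) :
    (∀ j, j < pvFirstAtLeast values x lo hi → j < values.length → values.getD j 0 < x) ∧
    (∀ j, pvFirstAtLeast values x lo hi ≤ j → j < values.length → x ≤ values.getD j 0) ∧
    pvFirstAtLeast values x lo hi ≤ values.length := by
  induction lo, hi using pvFirstAtLeast.induct values x with
  | case1 lo hi h mid hcmp ih =>
    rw [pvFirstAtLeast]
    simp only [h, dif_pos]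
    have hmid : mid < hi := by omega
    simp only [show (lo + hi) / 2 = mid from rfl, hcmp, if_pos]
    exact ih hhi (by omega)
      (fun j hj hjl => by
        by_cases hcase : j < lo
        · exact hb j hcase hjl
        · have hjm : j ≤ mid := by omega
          have : values.getD j 0 ≤ values.getD mid 0 := by
            rcases Nat.lt_or_ge j mid with hlt | hge
            · rw [List.getD_eq_getElem _ _ hjl, List.getD_eq_getElem _ _ (by omega : mid < values.length)]
              exact (List.pairwise_iff_getElem.mp hs) j mid hjl (by omega) hlt
            · have : j = mid := by omega
              simp [this]
          omega)
      ha
  | case2 lo hi h mid hcmp ih =>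
    rw [pvFirstAtLeast]
    simp only [h, dif_pos]
    have hmidlt : mid < values.length := by omega
    simp only [show (lo + hi) / 2 = mid from rfl, hcmp]
    exact ih (by omega) (by omega) hb
      (fun j hj hjl => by
        have hxm : x ≤ values.getD mid 0 := by omega
        have : values.getD mid 0 ≤ values.getD j 0 := by
          rcases Nat.lt_or_ge mid j with hlt | hge
          · rw [List.getD_eq_getElem _ _ hmidlt, List.getD_eq_getElem _ _ hjl]
            exact (List.pairwise_iff_getElem.mp hs) mid j hmidlt hjl hlt
          · have : mid = j := by omega
            simp [this]
        omega)
  | case3 lo hi h =>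
    rw [pvFirstAtLeast, dif_neg h]
    exact ⟨fun j hj hjl => hb j (by omega) hjl,
           fun j hj hjl => ha j (by omega) hjl, by omega⟩

-- for any coreSize in the table, A's linear scan equals B's binary search on the row
theorem core_eq (d : PySem.Dict Int Int) (row : List Int) (n : Int)
    (hrow : row = (PySem.List.pyRange 14 38 2).map (fun w => d.getD w 0))
    (hs : row.Pairwise (· ≤ ·)) (hlen : row.length = 12) :
    pvALoop d n (PySem.List.pyRange 14 37 2) =
      (if pvFirstAtLeast row n 0 row.length < row.length
       then some (14 + 2 * ((pvFirstAtLeast row n 0 row.length : Nat) : Int)) else none) := by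
  obtain ⟨hlt, hge, hle⟩ := pvFirstAtLeast_inv row n hs 0 row.length (le_refl _) (Nat.zero_le _)
    (by omega) (fun j hj hjl => by omega)
  set i := pvFirstAtLeast row n 0 row.length with hi
  have hws : PySem.List.pyRange 14 37 2 = PySem.List.pyRange 14 38 2 := by decide
  rw [pvALoop_eq_find?, hws]
  rw [find?_eq_getElem?_of_first (PySem.List.pyRange 14 38 2)
        (fun w => decide (d.getD w 0 ≥ n)) i
        (fun j hj hji => by
          have hjr : j < row.length := by simpa [hrow] using hj
          have := hlt j hji hjr
          rw [hrow, List.getD_eq_getElem _ _ (by simpa [hrow] using hjr)] at this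
          simp only [List.getElem_map] at this
          simp; omega)
        (fun hj => by
          have hjr : i < row.length := by simpa [hrow] using hj
          have := hge i (le_refl _) hjr
          rw [hrow, List.getD_eq_getElem _ _ (by simpa [hrow] using hjr)] at this
          simp only [List.getElem_map] at this
          simp; omega)]
  rw [hlen] at hle ⊢
  clear hlt hge hrow hs
  clear_value i
  interval_cases i <;> simp <;> decide

-- ===== VERDICT (by name: the statement is the Claim_ definition above) =====
theorem max_AWG_spec : Claim_equal_max_AWG := by
  intro coreSize numTurns _ hpre
  unfold Spec_max_AWG
  unfold Pre_max_AWG at hpre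
  fin_cases hpre <;>
    exact core_eq _ _ _ (by decide) (by decide) (by decide)
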